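-- pv_equiv track=rewrite | github.com/newbieeashish/LeetCode_Algo | 2nd_35_questions/CellOddValuesMatrix.py | CellsWithOddValues
-- ===== SOURCE A (Python) =====
-- def CellsWithOddValues(n,m,indices):
--     row = [0]*n
--     col = [0]*m
--     odd = 0
--     for point in indices:
--         row[point[0]] +=1
--         col[point[1]] +=1
--
--     for i in range(n):
--         for j in range(m):
--             if (row[i]+col[j]) %2:
--                 odd +=1
--
--     return odd
-- ===== SOURCE B (Python) =====
-- def CellsWithOddValues(n, m, indices):
--     # Track only parities: toggle a boolean per touched row/column, then combine.
--     # A cell (i,j) is odd iff exactly one of row i / column j was toggled an odd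
--     # number of times, so the answer is oddR*(m-oddC) + (n-oddR)*oddC.
--     rodd = [False] * n
--     codd = [False] * m
--     for r, c in indices:
--         rodd[r] = not rodd[r]
--         codd[c] = not codd[c]
--     oddR = sum(rodd)
--     oddC = sum(codd)
--     return oddR * (m - oddC) + (n - oddR) * oddC
-- ===== Notes on version B (the rewrite author's own statement) =====
-- stated objective: faster
-- what changed: B keeps only row/column parity booleans (toggled per increment) and returns the closed form oddR*(m-oddC)+(n-oddR)*oddC instead of A's nested scan over all n*m cells.
import Mathlib
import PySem

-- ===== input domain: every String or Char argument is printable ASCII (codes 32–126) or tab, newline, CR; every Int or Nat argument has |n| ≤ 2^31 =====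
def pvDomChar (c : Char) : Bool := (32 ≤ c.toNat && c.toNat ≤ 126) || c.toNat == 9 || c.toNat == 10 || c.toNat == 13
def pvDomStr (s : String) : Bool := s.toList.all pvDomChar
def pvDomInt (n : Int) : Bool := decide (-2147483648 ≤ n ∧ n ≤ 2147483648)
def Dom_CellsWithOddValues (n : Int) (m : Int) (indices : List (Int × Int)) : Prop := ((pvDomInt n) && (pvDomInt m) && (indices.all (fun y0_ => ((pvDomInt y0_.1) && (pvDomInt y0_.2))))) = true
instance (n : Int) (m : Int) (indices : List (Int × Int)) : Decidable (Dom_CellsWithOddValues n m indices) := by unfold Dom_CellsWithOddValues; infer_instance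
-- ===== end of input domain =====

-- ===== PORT A =====
-- B tracks only row/column parity booleans and combines the odd counts in closed
-- form instead of A's nested scan over all n*m cells (objective: faster).
def CellsWithOddValues (n : Int) (m : Int) (indices : List (Int × Int)) : Int :=
  let row : List Int := List.replicate n.toNat 0
  let col : List Int := List.replicate m.toNat 0
  let rc := indices.foldl (fun (rc : List Int × List Int) point =>
      (PySem.List.pySetD rc.1 point.1 (PySem.List.pyGetD rc.1 point.1 0 + 1),
       PySem.List.pySetD rc.2 point.2 (PySem.List.pyGetD rc.2 point.2 0 + 1)))
    (row, col)
  (PySem.List.pyRange 0 n).foldl (fun odd i =>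
    (PySem.List.pyRange 0 m).foldl (fun odd j =>
      if PySem.Int.mod (PySem.List.pyGetD rc.1 i 0 + PySem.List.pyGetD rc.2 j 0) 2 ≠ 0
      then odd + 1 else odd) odd) 0

-- ===== PORT B =====
def CellsWithOddValues_alt (n : Int) (m : Int) (indices : List (Int × Int)) : Int :=
  let rodd : List Bool := List.replicate n.toNat false
  let codd : List Bool := List.replicate m.toNat false
  let rc := indices.foldl (fun (rc : List Bool × List Bool) p =>
      (PySem.List.pySetD rc.1 p.1 (! PySem.List.pyGetD rc.1 p.1 false),
       PySem.List.pySetD rc.2 p.2 (! PySem.List.pyGetD rc.2 p.2 false)))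
    (rodd, codd)
  let oddR : Int := (rc.1.countP id : Nat)
  let oddC : Int := (rc.2.countP id : Nat)
  oddR * (m - oddC) + (n - oddR) * oddC

-- ===== PRECONDITION & SPEC =====
-- Pre_ excludes exactly the inputs where A raises IndexError: some point has an
-- index outside Python's valid (negative-wrapping) range for the row/column lists.
def Pre_CellsWithOddValues (n : Int) (m : Int) (indices : List (Int × Int)) : Prop :=
  ∀ p ∈ indices, PySem.Raise.InRange n.toNat p.1 ∧ PySem.Raise.InRange m.toNat p.2
instance (n : Int) (m : Int) (indices : List (Int × Int)) : Decidable (Pre_CellsWithOddValues n m indices) := by unfold Pre_CellsWithOddValues; infer_instance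
def pvWitness_CellsWithOddValues : Int × Int × (List (Int × Int)) := (2, 3, [(0, 1), (-1, 2), (1, -3)])
def Spec_CellsWithOddValues (n : Int) (m : Int) (indices : List (Int × Int)) (out : Int) : Prop := out = CellsWithOddValues_alt n m indices
instance (n : Int) (m : Int) (indices : List (Int × Int)) (out : Int) : Decidable (Spec_CellsWithOddValues n m indices out) := by unfold Spec_CellsWithOddValues; infer_instance

-- ===== CLAIM (what is proved, stated in full; the proofs are below) =====
def Claim_equal_CellsWithOddValues : Prop := ∀ (n : Int) (m : Int) (indices : List (Int × Int)), Dom_CellsWithOddValues n m indices → Pre_CellsWithOddValues n m indices → Spec_CellsWithOddValues n m indices (CellsWithOddValues n m indices)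

-- ===== LEMMAS AND PROOFS =====

-- parity of an integer, as B's booleans see it
def pvPar (x : Int) : Bool := decide (PySem.Int.mod x 2 = 1)

theorem pvPar_succ (x : Int) : pvPar (x + 1) = ! pvPar x := by
  simp only [pvPar, PySem.Int.mod_eq_emod_of_pos (show (0:Int) < 2 by norm_num)]
  rcases Int.emod_two_eq x with h | h <;> simp [Int.add_emod, h]

theorem pvMod_add_ne_zero (a b : Int) :
    (PySem.Int.mod (a + b) 2 ≠ 0) = (pvPar a ≠ pvPar b) := by
  simp only [pvPar, PySem.Int.mod_eq_emod_of_pos (show (0:Int) < 2 by norm_num)]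
  rcases Int.emod_two_eq a with h1 | h1 <;> rcases Int.emod_two_eq b with h2 | h2 <;>
    simp [Int.add_emod, h1, h2]

theorem pvSetD_map {α β : Type} (f : α → β) (xs : List α) (i : Int) (v : α) :
    PySem.List.pySetD (xs.map f) i (f v) = (PySem.List.pySetD xs i v).map f := by
  simp only [PySem.List.pySetD, PySem.List.pySet?, List.length_map]
  cases PySem.List.pyIdx? xs.length i <;> simp

theorem pvGetD_parmap (xs : List Int) (i : Int) :
    PySem.List.pyGetD (xs.map pvPar) i false = pvPar (PySem.List.pyGetD xs i 0) := by
  rw [show (false : Bool) = pvPar 0 from by decide]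
  exact PySem.List.pyGetD_map pvPar xs i 0

-- the two update loops stay related by taking parities pointwise
theorem pvLoop_map (indices : List (Int × Int)) (r c : List Int) :
    indices.foldl (fun (rc : List Bool × List Bool) p =>
        (PySem.List.pySetD rc.1 p.1 (! PySem.List.pyGetD rc.1 p.1 false),
         PySem.List.pySetD rc.2 p.2 (! PySem.List.pyGetD rc.2 p.2 false)))
      (r.map pvPar, c.map pvPar)
    = (Prod.map (List.map pvPar) (List.map pvPar))
        (indices.foldl (fun (rc : List Int × List Int) point =>
          (PySem.List.pySetD rc.1 point.1 (PySem.List.pyGetD rc.1 point.1 0 + 1),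
           PySem.List.pySetD rc.2 point.2 (PySem.List.pyGetD rc.2 point.2 0 + 1)))
        (r, c)) := by
  induction indices generalizing r c with
  | nil => rfl
  | cons p ps ih =>
    simp only [List.foldl_cons]
    rw [pvGetD_parmap r, pvGetD_parmap c, ← pvPar_succ, ← pvPar_succ,
        pvSetD_map, pvSetD_map]
    exact ih _ _

-- the update loop preserves both lengths
theorem pvLoop_len (indices : List (Int × Int)) (r c : List Int) :
    (indices.foldl (fun (rc : List Int × List Int) point =>
        (PySem.List.pySetD rc.1 point.1 (PySem.List.pyGetD rc.1 point.1 0 + 1),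
         PySem.List.pySetD rc.2 point.2 (PySem.List.pyGetD rc.2 point.2 0 + 1)))
      (r, c)).1.length = r.length ∧
    (indices.foldl (fun (rc : List Int × List Int) point =>
        (PySem.List.pySetD rc.1 point.1 (PySem.List.pyGetD rc.1 point.1 0 + 1),
         PySem.List.pySetD rc.2 point.2 (PySem.List.pyGetD rc.2 point.2 0 + 1)))
      (r, c)).2.length = c.length := by
  induction indices generalizing r c with
  | nil => exact ⟨rfl, rfl⟩
  | cons p ps ih =>
    simp only [List.foldl_cons]
    exact ⟨(ih _ _).1.trans (PySem.List.length_pySetD _ _ _),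
           (ih _ _).2.trans (PySem.List.length_pySetD _ _ _)⟩

-- A's inner loop counts the columns whose parity differs from the fixed row value
theorem pvInner (cs : List Int) (a : Int) (acc : Int) :
    cs.foldl (fun odd c =>
        if PySem.Int.mod (a + c) 2 ≠ 0 then odd + 1 else odd) acc
    = acc + (if pvPar a then (cs.length : Int) - cs.countP pvPar else cs.countP pvPar) := by
  induction cs generalizing acc with
  | nil => cases h : pvPar a <;> simp
  | cons c cs ih =>
    simp only [List.foldl_cons]
    rw [ih]
    have hcond : (PySem.Int.mod (a + c) 2 ≠ 0) = (pvPar a ≠ pvPar c) := pvMod_add_ne_zero a c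
    simp only [hcond, List.countP_cons, List.length_cons]
    cases ha : pvPar a <;> cases hc : pvPar c <;> simp [ha, hc] <;> push_cast <;> ring

-- A's outer loop in closed form
theorem pvOuter (rs : List Int) (oc mm : Int) (acc : Int) :
    rs.foldl (fun odd r => odd + (if pvPar r then mm - oc else oc)) acc
    = acc + (rs.countP pvPar : Int) * (mm - oc)
        + ((rs.length : Int) - rs.countP pvPar) * oc := by
  induction rs generalizing acc with
  | nil => simp
  | cons r rs ih =>
    simp only [List.foldl_cons, ih, List.countP_cons, List.length_cons]
    cases hr : pvPar r <;> simp [hr] <;> push_cast <;> ring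

theorem pvCountP_replicate_zero (k : Nat) :
    (List.replicate k (0 : Int)).countP pvPar = 0 := by
  exact List.countP_eq_zero.mpr fun a ha => by
    rw [List.eq_of_mem_replicate ha]; decide

-- B's value, expressed through the integer update loop
theorem pvAltEq (n m : Int) (indices : List (Int × Int)) :
    CellsWithOddValues_alt n m indices
    = (((indices.foldl (fun (rc : List Int × List Int) point =>
          (PySem.List.pySetD rc.1 point.1 (PySem.List.pyGetD rc.1 point.1 0 + 1),
           PySem.List.pySetD rc.2 point.2 (PySem.List.pyGetD rc.2 point.2 0 + 1)))
        (List.replicate n.toNat 0, List.replicate m.toNat 0)).1.countP pvPar : Nat) : Int)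
        * (m - (((indices.foldl (fun (rc : List Int × List Int) point =>
          (PySem.List.pySetD rc.1 point.1 (PySem.List.pyGetD rc.1 point.1 0 + 1),
           PySem.List.pySetD rc.2 point.2 (PySem.List.pyGetD rc.2 point.2 0 + 1)))
        (List.replicate n.toNat 0, List.replicate m.toNat 0)).2.countP pvPar : Nat) : Int))
      + (n - (((indices.foldl (fun (rc : List Int × List Int) point =>
          (PySem.List.pySetD rc.1 point.1 (PySem.List.pyGetD rc.1 point.1 0 + 1),
           PySem.List.pySetD rc.2 point.2 (PySem.List.pyGetD rc.2 point.2 0 + 1)))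
        (List.replicate n.toNat 0, List.replicate m.toNat 0)).1.countP pvPar : Nat) : Int))
        * (((indices.foldl (fun (rc : List Int × List Int) point =>
          (PySem.List.pySetD rc.1 point.1 (PySem.List.pyGetD rc.1 point.1 0 + 1),
           PySem.List.pySetD rc.2 point.2 (PySem.List.pyGetD rc.2 point.2 0 + 1)))
        (List.replicate n.toNat 0, List.replicate m.toNat 0)).2.countP pvPar : Nat) : Int) := by
  show (let rodd : List Bool := List.replicate n.toNat false
        let codd : List Bool := List.replicate m.toNat false
        let rc := indices.foldl (fun (rc : List Bool × List Bool) p =>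
            (PySem.List.pySetD rc.1 p.1 (! PySem.List.pyGetD rc.1 p.1 false),
             PySem.List.pySetD rc.2 p.2 (! PySem.List.pyGetD rc.2 p.2 false)))
          (rodd, codd)
        let oddR : Int := (rc.1.countP id : Nat)
        let oddC : Int := (rc.2.countP id : Nat)
        oddR * (m - oddC) + (n - oddR) * oddC) = _
  have hinit : (List.replicate n.toNat false, List.replicate m.toNat false)
      = ((List.replicate n.toNat (0:Int)).map pvPar, (List.replicate m.toNat (0:Int)).map pvPar) := by
    simp [List.map_replicate, show pvPar 0 = false from by decide]
  simp only [hinit, pvLoop_map, Prod.map, List.countP_map,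
    show (id ∘ pvPar) = pvPar from rfl]

-- ===== VERDICT (by name: the statement is the Claim_ definition above) =====
theorem CellsWithOddValues_spec : Claim_equal_CellsWithOddValues := by
  intro n m indices _ hpre
  unfold Spec_CellsWithOddValues
  rw [pvAltEq]
  show ((PySem.List.pyRange 0 n).foldl (fun odd i =>
      (PySem.List.pyRange 0 m).foldl (fun odd j =>
        if PySem.Int.mod
          (PySem.List.pyGetD (indices.foldl (fun (rc : List Int × List Int) point =>
              (PySem.List.pySetD rc.1 point.1 (PySem.List.pyGetD rc.1 point.1 0 + 1),
               PySem.List.pySetD rc.2 point.2 (PySem.List.pyGetD rc.2 point.2 0 + 1)))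
            (List.replicate n.toNat 0, List.replicate m.toNat 0)).1 i 0 +
           PySem.List.pyGetD (indices.foldl (fun (rc : List Int × List Int) point =>
              (PySem.List.pySetD rc.1 point.1 (PySem.List.pyGetD rc.1 point.1 0 + 1),
               PySem.List.pySetD rc.2 point.2 (PySem.List.pyGetD rc.2 point.2 0 + 1)))
            (List.replicate n.toNat 0, List.replicate m.toNat 0)).2 j 0) 2 ≠ 0
        then odd + 1 else odd) odd) 0) = _
  set rcA := indices.foldl (fun (rc : List Int × List Int) point =>
      (PySem.List.pySetD rc.1 point.1 (PySem.List.pyGetD rc.1 point.1 0 + 1),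
       PySem.List.pySetD rc.2 point.2 (PySem.List.pyGetD rc.2 point.2 0 + 1)))
    (List.replicate n.toNat 0, List.replicate m.toNat 0) with hrcA
  have hlen := pvLoop_len indices (List.replicate n.toNat 0) (List.replicate m.toNat 0)
  rw [← hrcA] at hlen
  simp only [List.length_replicate] at hlen
  by_cases hn : 0 ≤ n
  · by_cases hm : 0 ≤ m
    · -- main case
      have hn' : PySem.List.len rcA.1 = n := by
        simp only [PySem.List.len, hlen.1]; omega
      have hm' : PySem.List.len rcA.2 = m := by
        simp only [PySem.List.len, hlen.2]; omega
      have h1 : ((rcA.1.length : Nat) : Int) = n := by rw [hlen.1]; omega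
      have h2 : ((rcA.2.length : Nat) : Int) = m := by rw [hlen.2]; omega
      have hinner : ∀ (odd i : Int),
          (PySem.List.pyRange 0 m).foldl (fun odd j =>
            if PySem.Int.mod (PySem.List.pyGetD rcA.1 i 0 + PySem.List.pyGetD rcA.2 j 0) 2 ≠ 0
            then odd + 1 else odd) odd
          = odd + (if pvPar (PySem.List.pyGetD rcA.1 i 0)
                   then m - (rcA.2.countP pvPar : Int) else (rcA.2.countP pvPar : Int)) := by
        intro odd i
        rw [← hm', PySem.List.foldl_pyRange_zero_pyGetD rcA.2 0
            (fun acc c => if PySem.Int.mod (PySem.List.pyGetD rcA.1 i 0 + c) 2 ≠ 0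
                          then acc + 1 else acc) odd,
          pvInner, h2, hm']
      have houter : (fun (odd i : Int) =>
          (PySem.List.pyRange 0 m).foldl (fun odd j =>
            if PySem.Int.mod (PySem.List.pyGetD rcA.1 i 0 + PySem.List.pyGetD rcA.2 j 0) 2 ≠ 0
            then odd + 1 else odd) odd)
          = fun (odd i : Int) => odd + (if pvPar (PySem.List.pyGetD rcA.1 i 0)
              then m - (rcA.2.countP pvPar : Int) else (rcA.2.countP pvPar : Int)) :=
        funext fun odd => funext fun i => hinner odd i
      rw [houter, ← hn', PySem.List.foldl_pyRange_zero_pyGetD rcA.1 0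
          (fun acc r => acc + (if pvPar r
            then m - (rcA.2.countP pvPar : Int) else (rcA.2.countP pvPar : Int))) 0,
        pvOuter, h1, hn']
      ring
    · -- m < 0: indices must be empty, both sides are 0
      have hemp : indices = [] := by
        cases indices with
        | nil => rfl
        | cons p ps =>
          have h := (hpre p (by simp)).2
          simp [PySem.Raise.InRange, show m.toNat = 0 by omega] at h
          omega
      subst hemp
      simp only [List.foldl_nil] at hrcA
      rw [PySem.List.pyRange_one_eq_nil (by omega : m ≤ 0)]
      simp only [List.foldl_nil, List.foldl_fixed, hrcA,
        show m.toNat = 0 by omega, List.replicate_zero, List.countP_nil,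
        pvCountP_replicate_zero]
      push_cast
      ring
  · -- n < 0: indices must be empty, both sides are 0
    have hemp : indices = [] := by
      cases indices with
      | nil => rfl
      | cons p ps =>
        have h := (hpre p (by simp)).1
        simp [PySem.Raise.InRange, show n.toNat = 0 by omega] at h
        omega
    subst hemp
    simp only [List.foldl_nil] at hrcA
    rw [PySem.List.pyRange_one_eq_nil (by omega : n ≤ 0)]
    simp only [List.foldl_nil, hrcA,
      show n.toNat = 0 by omega, List.replicate_zero, List.countP_nil,
      pvCountP_replicate_zero]
    push_cast
    ring
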